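-- pv_equiv track=rewrite | github.com/4luqard/polymer-performance-prediction | extract_features.py | calculate_backbone_bonds
-- ===== SOURCE A (Python) =====
-- def calculate_backbone_bonds(smiles):
--     """
--     Calculate the number of bonds in the main backbone of a polymer.
--     The main backbone excludes bonds inside parentheses (branches).
--
--     Examples:
--     *CCCCCC* -> 5 bonds (C-C-C-C-C-C)
--     *CC(C)CC* -> 3 bonds (C-C-C-C, excluding C branch)
--     *CC(=O)CC* -> 3 bonds (C-C-C-C, excluding =O branch)
--     """
--     # Remove polymer end markers for processing
--     clean_smiles = smiles.replace('*', '')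
--
--     backbone_bonds = 0
--     in_branch = False
--     branch_depth = 0
--     prev_atom = False
--
--     i = 0
--     while i < len(clean_smiles):
--         char = clean_smiles[i]
--
--         if char == '(':
--             branch_depth += 1
--             in_branch = True
--             prev_atom = False
--             i += 1
--             continue
--         elif char == ')':
--             branch_depth -= 1
--             if branch_depth == 0:
--                 in_branch = False
--                 # After closing branch, next bond connects to backbone
--                 prev_atom = True
--             i += 1
--             continue
--
--         # Skip bonds and numbers when in branch
--         if in_branch:
--             i += 1
--             continue
--
--         # Check for bonds
--         if char in '-=#:':
--             if prev_atom and i + 1 < len(clean_smiles):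
--                 # Check if next character is an atom
--                 next_char = clean_smiles[i + 1]
--                 if i + 2 < len(clean_smiles) and clean_smiles[i + 1:i + 3] in ['Cl', 'Br']:
--                     backbone_bonds += 1
--                 elif next_char in 'CNOSFIPcnos':
--                     backbone_bonds += 1
--             i += 1
--             continue
--
--         # Check for atoms
--         if i + 1 < len(clean_smiles) and clean_smiles[i:i+2] in ['Cl', 'Br']:
--             if not in_branch:
--                 if prev_atom:
--                     # Implicit single bond
--                     backbone_bonds += 1
--                 prev_atom = True
--             i += 2
--         elif char in 'CNOSFIPcnos':
--             if not in_branch: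
--                 if prev_atom and i > 0:
--                     prev_char = clean_smiles[i-1]
--                     # Count implicit bond if no explicit bond symbol
--                     if prev_char not in '-=#:':
--                         backbone_bonds += 1
--                 prev_atom = True
--             i += 1
--         else:
--             # Skip other characters (numbers, etc.)
--             i += 1
--
--     return backbone_bonds
-- ===== SOURCE B (Python) =====
-- def calculate_backbone_bonds(smiles):
--     s = smiles.replace('*', '')
--     # Phase 1: tokenize (two-char atoms Cl/Br, single atoms carrying an
--     # "immediately preceded by an explicit bond char" flag, parens, bonds, other)
--     toks = []
--     i = 0
--     n = len(s)
--     while i < n: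
--         if s[i:i + 2] in ('Cl', 'Br'):
--             toks.append(('atom2', False))
--             i += 2
--         elif s[i] == '(':
--             toks.append(('lp', False))
--             i += 1
--         elif s[i] == ')':
--             toks.append(('rp', False))
--             i += 1
--         elif s[i] in '-=#:':
--             toks.append(('bond', False))
--             i += 1
--         elif s[i] in 'CNOSFIPcnos':
--             toks.append(('atom1', i > 0 and s[i - 1] in '-=#:'))
--             i += 1
--         else:
--             toks.append(('other', False))
--             i += 1
--     # Phase 2: fold over the token stream
--     count = 0
--     depth = 0
--     in_branch = False
--     prev = False
--     for k, (t, b) in enumerate(toks):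
--         if t == 'lp':
--             depth += 1
--             in_branch = True
--             prev = False
--         elif t == 'rp':
--             depth -= 1
--             if depth == 0:
--                 in_branch = False
--                 prev = True
--         elif in_branch:
--             pass
--         elif t == 'bond':
--             if prev and k + 1 < len(toks) and toks[k + 1][0] in ('atom1', 'atom2'):
--                 count += 1
--         elif t == 'atom2':
--             if prev:
--                 count += 1
--             prev = True
--         elif t == 'atom1':
--             if prev and not b:
--                 count += 1
--             prev = True
--     return count
-- ===== Notes on version B (the rewrite author's own statement) =====
-- stated objective: alternative
-- what changed: Replaces A's single index-juggling while loop (with slice lookaheads and clean[i-1] lookback) by a two-phase decomposition: first tokenize the cleaned string into a token stream (two-char atoms Cl/Br, single atoms carrying a preceded-by-explicit-bond flag, parens, bonds, other), then a separate fold over the tokens maintaining (count, depth, in_branch, prev) with token-level lookahead.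
import Mathlib
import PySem

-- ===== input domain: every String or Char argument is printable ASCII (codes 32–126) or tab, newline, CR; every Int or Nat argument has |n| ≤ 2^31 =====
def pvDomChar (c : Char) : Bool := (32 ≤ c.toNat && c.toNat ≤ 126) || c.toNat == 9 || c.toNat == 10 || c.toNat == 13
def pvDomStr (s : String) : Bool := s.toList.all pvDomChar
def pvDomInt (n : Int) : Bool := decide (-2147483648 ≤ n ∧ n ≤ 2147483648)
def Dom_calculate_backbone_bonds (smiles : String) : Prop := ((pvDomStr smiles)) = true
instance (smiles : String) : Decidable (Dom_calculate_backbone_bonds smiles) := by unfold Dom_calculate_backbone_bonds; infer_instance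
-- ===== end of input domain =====

-- B replaces A's index-juggling while loop by a tokenize-then-fold decomposition (objective: alternative, same cost).

-- shared character classes (mirror the Python string-membership tests `in '-=#:'` / `in 'CNOSFIPcnos'`)
def bondChars : List Char := ['-', '=', '#', ':']
def atomChars : List Char := ['C', 'N', 'O', 'S', 'F', 'I', 'P', 'c', 'n', 'o', 's']
-- mirrors `… in ['Cl','Br']` on a 2-char slice
def isClBr (a b : Char) : Bool := (a = 'C' && b = 'l') || (a = 'B' && b = 'r')

-- ===== PORT A =====
-- the while loop, with fuel = remaining ≥ len - i (a totality guard only: each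
-- iteration advances i by ≥ 1, so fuel = length suffices and the base case is unreachable
-- while i < len). cs[i]? = none is exactly `i < len(clean)` failing.
def goA (cs : List Char) (fuel : Nat) (i : Nat) (count : Int) (inBranch : Bool)
    (depth : Int) (prevAtom : Bool) : Int :=
  match fuel with
  | 0 => count
  | fuel + 1 =>
    match cs[i]? with
    | none => count
    | some c =>
      if c = '(' then
        goA cs fuel (i + 1) count true (depth + 1) false
      else if c = ')' then
        let d := depth - 1
        if d = 0 then goA cs fuel (i + 1) count false d true
        else goA cs fuel (i + 1) count inBranch d prevAtom
      else if inBranch then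
        goA cs fuel (i + 1) count inBranch depth prevAtom
      else if bondChars.contains c then
        let add : Int :=
          if prevAtom then
            -- `i+1 < len` then the two lookaheads clean[i+1:i+3] / clean[i+1]
            match cs[i + 1]?, cs[i + 2]? with
            | some a, some b => if isClBr a b then 1 else if atomChars.contains a then 1 else 0
            | some a, none => if atomChars.contains a then 1 else 0
            | none, _ => 0
          else 0
        goA cs fuel (i + 1) (count + add) inBranch depth prevAtom
      else
        match cs[i + 1]? with
        | some b =>
          if isClBr c b then
            if !inBranch then
              goA cs fuel (i + 2) (count + (if prevAtom then 1 else 0)) inBranch depth true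
            else
              goA cs fuel (i + 2) count inBranch depth prevAtom
          else if atomChars.contains c then
            let add : Int :=
              if prevAtom && decide (0 < i) then
                match cs[i - 1]? with
                | some p => if bondChars.contains p then 0 else 1
                | none => 1   -- unreachable: 0 < i < len
              else 0
            if !inBranch then goA cs fuel (i + 1) (count + add) inBranch depth true
            else goA cs fuel (i + 1) count inBranch depth prevAtom
          else
            goA cs fuel (i + 1) count inBranch depth prevAtom
        | none =>
          if atomChars.contains c then
            let add : Int :=
              if prevAtom && decide (0 < i) then
                match cs[i - 1]? with
                | some p => if bondChars.contains p then 0 else 1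
                | none => 1
              else 0
            if !inBranch then goA cs fuel (i + 1) (count + add) inBranch depth true
            else goA cs fuel (i + 1) count inBranch depth prevAtom
          else
            goA cs fuel (i + 1) count inBranch depth prevAtom

def calculate_backbone_bonds (smiles : String) : Int :=
  -- smiles.replace('*','') removes every '*': exactly a filter on the characters
  let clean := smiles.toList.filter (fun c => c ≠ '*')
  goA clean clean.length 0 0 false 0 false

-- ===== PORT B =====
inductive Tok where
  | lp | rp | bond | atom2 | other : Tok
  | atom1 : Bool → Tok
deriving DecidableEq, Repr

-- token for a single character; p = the raw previous character (for the atom1 flag)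
def tok1 (a : Char) (p : Option Char) : Tok :=
  if a = '(' then Tok.lp
  else if a = ')' then Tok.rp
  else if bondChars.contains a then Tok.bond
  else if atomChars.contains a then
    Tok.atom1 (match p with | some q => bondChars.contains q | none => false)
  else Tok.other

-- Phase 1: tokenizer (the first while loop of Source B)
def tokB : List Char → Option Char → List Tok
  | [], _ => []
  | [a], p => [tok1 a p]
  | a :: b :: rest, p =>
    if isClBr a b then Tok.atom2 :: tokB rest (some b)
    else tok1 a p :: tokB (b :: rest) (some a)

-- `toks[k+1][0] in ('atom1','atom2')` on the remaining tokens
def nextAtom : List Tok → Bool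
  | Tok.atom2 :: _ => true
  | Tok.atom1 _ :: _ => true
  | _ => false

-- Phase 2: the fold over the token stream (the for loop of Source B)
def fbB : List Tok → Int → Int → Bool → Bool → Int
  | [], count, _, _, _ => count
  | t :: rest, count, depth, inBranch, prev =>
    match t with
    | Tok.lp => fbB rest count (depth + 1) true false
    | Tok.rp =>
      let d := depth - 1
      if d = 0 then fbB rest count d false true
      else fbB rest count d inBranch prev
    | t' =>
      if inBranch then fbB rest count depth inBranch prev
      else
        match t' with
        | Tok.bond => fbB rest (count + (if prev && nextAtom rest then 1 else 0)) depth inBranch prev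
        | Tok.atom2 => fbB rest (count + (if prev then 1 else 0)) depth inBranch true
        | Tok.atom1 b => fbB rest (count + (if prev && !b then 1 else 0)) depth inBranch true
        | _ => fbB rest count depth inBranch prev

def calculate_backbone_bonds_alt (smiles : String) : Int :=
  let clean := smiles.toList.filter (fun c => c ≠ '*')
  fbB (tokB clean none) 0 0 false false

-- ===== PRECONDITION & SPEC =====
def Spec_calculate_backbone_bonds (smiles : String) (out : Int) : Prop := out = calculate_backbone_bonds_alt smiles
instance (smiles : String) (out : Int) : Decidable (Spec_calculate_backbone_bonds smiles out) := by unfold Spec_calculate_backbone_bonds; infer_instance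

-- ===== CLAIM (what is proved, stated in full; the proofs are below) =====
def Claim_equal_calculate_backbone_bonds : Prop := ∀ (smiles : String), Dom_calculate_backbone_bonds smiles → Spec_calculate_backbone_bonds smiles (calculate_backbone_bonds smiles)

-- ===== LEMMAS AND PROOFS =====

-- the raw character before position i, as the tokenizer threads it
def pchar (cs : List Char) (i : Nat) : Option Char :=
  if i = 0 then none else cs[i - 1]?

theorem drop_none (cs : List Char) (i : Nat) (h : cs[i]? = none) : cs.drop i = [] := by
  rw [List.drop_eq_nil_iff]; exact List.getElem?_eq_none_iff.mp h

theorem drop_some (cs : List Char) (i : Nat) (c : Char) (h : cs[i]? = some c) :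
    cs.drop i = c :: cs.drop (i + 1) := by
  have hi : i < cs.length := (List.getElem?_eq_some_iff.mp h).1
  rw [List.drop_eq_getElem_cons hi]
  rcases List.getElem?_eq_some_iff.mp h with ⟨_, he⟩
  simp [he]

theorem nextAtom_tok1 (b : Char) (p : Option Char) (ts : List Tok) :
    nextAtom (tok1 b p :: ts) = atomChars.contains b := by
  unfold tok1
  split_ifs with h1 h2 h3 h4
  · subst h1; simp [nextAtom]; decide
  · subst h2; simp [nextAtom]; decide
  · simp [bondChars] at h3
    rcases h3 with rfl | rfl | rfl | rfl <;> simp [nextAtom] <;> decide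
  · show nextAtom (Tok.atom1 _ :: ts) = atomChars.contains b
    rw [h4]; rfl
  · simp only [Bool.not_eq_true] at h4
    show nextAtom (Tok.other :: ts) = atomChars.contains b
    rw [h4]; rfl

theorem tok1_bond (c : Char) (p : Option Char) (h : bondChars.contains c = true) :
    tok1 c p = Tok.bond := by
  simp [bondChars] at h
  rcases h with rfl | rfl | rfl | rfl <;> rfl

theorem tok1_atom (c : Char) (p : Option Char) (h : atomChars.contains c = true) :
    tok1 c p = Tok.atom1 (match p with | some q => bondChars.contains q | none => false) := by
  simp [atomChars] at h
  rcases h with rfl | rfl | rfl | rfl | rfl | rfl | rfl | rfl | rfl | rfl | rfl <;> rfl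

theorem tok1_other (c : Char) (p : Option Char) (h1 : c ≠ '(') (h2 : c ≠ ')')
    (h3 : bondChars.contains c = false) (h4 : atomChars.contains c = false) :
    tok1 c p = Tok.other := by
  have h3' : ¬ c ∈ bondChars := by simpa using h3
  have h4' : ¬ c ∈ atomChars := by simpa using h4
  unfold tok1; simp [h1, h2, h3', h4']

theorem tok1_ne_lp (c : Char) (p : Option Char) (h : c ≠ '(') : tok1 c p ≠ Tok.lp := by
  unfold tok1; split_ifs <;> simp_all

theorem tok1_ne_rp (c : Char) (p : Option Char) (h : c ≠ ')') : tok1 c p ≠ Tok.rp := by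
  unfold tok1; split_ifs <;> simp_all

theorem fbB_skip (t : Tok) (hl : t ≠ Tok.lp) (hr : t ≠ Tok.rp)
    (ts : List Tok) (count depth : Int) (prev : Bool) :
    fbB (t :: ts) count depth true prev = fbB ts count depth true prev := by
  cases t with
  | lp => exact absurd rfl hl
  | rp => exact absurd rfl hr
  | bond => simp [fbB]
  | atom2 => simp [fbB]
  | atom1 b => simp [fbB]
  | other => simp [fbB]

theorem isClBr_cases (a b : Char) (h : isClBr a b = true) :
    (a = 'C' ∧ b = 'l') ∨ (a = 'B' ∧ b = 'r') := by
  simp [isClBr] at h; tauto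

theorem main_lemma (cs : List Char) (fuel : Nat) :
    ∀ i count inBranch depth prevAtom,
      cs.length - i ≤ fuel → (i = 0 → prevAtom = false) →
      goA cs fuel i count inBranch depth prevAtom
        = fbB (tokB (cs.drop i) (pchar cs i)) count depth inBranch prevAtom := by
  induction fuel using Nat.strong_induction_on with
  | _ fuel IH =>
  intro i count inBranch depth prevAtom hf h0
  match fuel with
  | 0 =>
    have hd : cs.drop i = [] := List.drop_eq_nil_iff.mpr (by omega)
    simp [goA, hd, tokB, fbB]
  | (f : Nat) + 1 =>
    cases hc : cs[i]? with
    | none =>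
      have hd : cs.drop i = [] := drop_none cs i hc
      simp [goA, hc, hd, tokB, fbB]
    | some c =>
      have hd : cs.drop i = c :: cs.drop (i + 1) := drop_some cs i c hc
      have hilen : i < cs.length := (List.getElem?_eq_some_iff.mp hc).1
      have hp1 : pchar cs (i + 1) = some c := by simp [pchar, hc]
      have hfle : cs.length - (i + 1) ≤ f := by omega
      by_cases hpar : c = '('
      · -- '(' : depth+1, in_branch true, prev false
        subst hpar
        rw [goA]; simp only [hc]
        have hrhs : tokB (cs.drop i) (pchar cs i) = tok1 '(' (pchar cs i) :: tokB (cs.drop (i+1)) (some '(') := by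
          rw [hd]
          cases hc2 : cs[i+1]? with
          | none => rw [drop_none cs (i+1) hc2]; rfl
          | some b =>
            rw [drop_some cs (i+1) b hc2, tokB, if_neg (by simp [isClBr])]
        rw [IH f (by omega) (i+1) count true (depth+1) false hfle (by omega), hp1]
        simp [hrhs, fbB, show tok1 '(' (pchar cs i) = Tok.lp from rfl]
      · by_cases hrp : c = ')'
        · subst hrp
          rw [goA]; simp only [hc]
          have hrhs : tokB (cs.drop i) (pchar cs i) = tok1 ')' (pchar cs i) :: tokB (cs.drop (i+1)) (some ')') := by
            rw [hd]
            cases hc2 : cs[i+1]? with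
            | none => rw [drop_none cs (i+1) hc2]; rfl
            | some b =>
              rw [drop_some cs (i+1) b hc2, tokB, if_neg (by simp [isClBr])]
          by_cases hdz : depth - 1 = 0
          · rw [IH f (by omega) (i+1) count false (depth-1) true hfle (by omega), hp1]
            simp [hrhs, fbB, hdz, show tok1 ')' (pchar cs i) = Tok.rp from rfl]
          · rw [IH f (by omega) (i+1) count inBranch (depth-1) prevAtom hfle (by omega), hp1]
            simp [hrhs, fbB, hdz, show tok1 ')' (pchar cs i) = Tok.rp from rfl]
        · -- c is not a paren
          cases hc2 : cs[i+1]? with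
          | none =>
            -- last char: token list is [tok1 c p]
            have hd2 : cs.drop (i+1) = [] := drop_none cs (i+1) hc2
            have hrhs : tokB (cs.drop i) (pchar cs i) = [tok1 c (pchar cs i)] := by
              rw [hd, hd2]; rfl
            have hIH1 : ∀ (cnt : Int) (br : Bool) (d : Int) (pv : Bool),
                goA cs f (i+1) cnt br d pv = cnt := by
              intro cnt br d pv
              rw [IH f (by omega) (i+1) cnt br d pv hfle (by omega), hd2]; rfl
            rw [goA]; simp only [hc, hc2]
            rw [if_neg hpar, if_neg hrp, hrhs]
            by_cases hbranch : inBranch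
            · subst hbranch
              rw [if_pos rfl, hIH1,
                fbB_skip _ (tok1_ne_lp c _ hpar) (tok1_ne_rp c _ hrp)]
              rfl
            · have hnb : inBranch = false := by simpa using hbranch
              subst hnb
              rw [if_neg (by simp)]
              by_cases hbond : bondChars.contains c = true
              · rw [if_pos hbond, hIH1, tok1_bond c _ hbond]
                simp [fbB, nextAtom]
              · rw [if_neg hbond]
                by_cases hatom : atomChars.contains c = true
                · rw [if_pos hatom, hIH1, tok1_atom c _ hatom]
                  simp only [fbB, Bool.false_eq_true, if_neg (by simp : ¬ False)]
                  simp only [Bool.not_eq_true] at hbond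
                  cases i with
                  | zero =>
                    rw [h0 rfl]
                    simp [pchar]
                  | succ j =>
                    have hq : j < cs.length := by omega
                    have hsome : cs[j]? = some (cs[j]'hq) :=
                      List.getElem?_eq_some_iff.mpr ⟨hq, rfl⟩
                    have hpc : pchar cs (j+1) = some (cs[j]'hq) := by
                      simp [pchar, hsome]
                    rw [hpc]
                    cases prevAtom <;> cases hpb : bondChars.contains (cs[j]'hq) <;>
                      simp [hsome]
                · rw [if_neg hatom, hIH1,
                    tok1_other c _ hpar hrp (by simpa using hbond) (by simpa using hatom)]
                  simp [fbB]
          | some b =>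
            have hd2 : cs.drop (i+1) = b :: cs.drop (i+2) := drop_some cs (i+1) b hc2
            have hi1len : i + 1 < cs.length := (List.getElem?_eq_some_iff.mp hc2).1
            have hp2 : pchar cs (i + 2) = some b := by simp [pchar, hc2]
            have hIH1 : ∀ (cnt : Int) (br : Bool) (d : Int) (pv : Bool),
                goA cs f (i+1) cnt br d pv
                  = fbB (tokB (b :: cs.drop (i+2)) (some c)) cnt d br pv := by
              intro cnt br d pv
              rw [IH f (by omega) (i+1) cnt br d pv hfle (by omega), hp1, hd2]
            have hIH2 : ∀ (cnt : Int) (br : Bool) (d : Int) (pv : Bool),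
                goA cs f (i+2) cnt br d pv
                  = fbB (tokB (cs.drop (i+2)) (some b)) cnt d br pv := by
              intro cnt br d pv
              rw [IH f (by omega) (i+2) cnt br d pv (by omega) (by omega), hp2]
            by_cases hbr : isClBr c b = true
            · -- two-char atom Cl/Br
              have hrhs : tokB (cs.drop i) (pchar cs i)
                  = Tok.atom2 :: tokB (cs.drop (i+2)) (some b) := by
                rw [hd, hd2, tokB, if_pos hbr]
              have hcb : (c = 'C' ∧ b = 'l') ∨ (c = 'B' ∧ b = 'r') := isClBr_cases c b hbr
              by_cases hbranch : inBranch
              · subst hbranch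
                -- goA skips the two characters one at a time
                rw [goA]; simp only [hc]
                rw [if_neg hpar, if_neg hrp, if_pos trivial]
                obtain ⟨f2, rfl⟩ : ∃ f2, f = f2 + 1 := ⟨f - 1, by omega⟩
                rw [goA]; simp only [hc2]
                have hb1 : ¬ b = '(' := by rcases hcb with ⟨_, rfl⟩ | ⟨_, rfl⟩ <;> decide
                have hb2 : ¬ b = ')' := by rcases hcb with ⟨_, rfl⟩ | ⟨_, rfl⟩ <;> decide
                rw [if_neg hb1, if_neg hb2, if_pos trivial]
                rw [IH f2 (by omega) (i+2) count true depth prevAtom (by omega) (by omega),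
                  hp2, hrhs, fbB]
                simp
              · have hnb : inBranch = false := by simpa using hbranch
                subst hnb
                rw [goA]; simp only [hc, hc2]
                have hcbond : bondChars.contains c = false := by
                  rcases hcb with ⟨rfl, _⟩ | ⟨rfl, _⟩ <;> decide
                rw [if_neg hpar, if_neg hrp, if_neg (by simp), if_neg (by simpa using hcbond),
                  if_pos hbr, if_pos (by simp), hIH2, hrhs, fbB]
                simp
            · -- single-char token
              have hrhs : tokB (cs.drop i) (pchar cs i)
                  = tok1 c (pchar cs i) :: tokB (b :: cs.drop (i+2)) (some c) := by
                rw [hd, hd2, tokB, if_neg (by simp [hbr])]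
              rw [goA]; simp only [hc, hc2]
              rw [if_neg hpar, if_neg hrp]
              by_cases hbranch : inBranch
              · subst hbranch
                rw [if_pos rfl, hIH1, hrhs,
                  fbB_skip _ (tok1_ne_lp c _ hpar) (tok1_ne_rp c _ hrp)]
              · have hnb : inBranch = false := by simpa using hbranch
                subst hnb
                rw [if_neg (by simp)]
                by_cases hbond : bondChars.contains c = true
                · -- explicit bond: compare the lookahead with nextAtom of the token tail
                  rw [if_pos hbond, hIH1, hrhs, tok1_bond c _ hbond]
                  have hnext : nextAtom (tokB (b :: cs.drop (i+2)) (some c))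
                      = (match cs[i+2]? with
                         | some b2 => if isClBr b b2 then true else atomChars.contains b
                         | none => atomChars.contains b) := by
                    cases hc3 : cs[i+2]? with
                    | none => rw [drop_none cs (i+2) hc3, tokB, nextAtom_tok1]
                    | some b2 =>
                      rw [drop_some cs (i+2) b2 hc3, tokB]
                      by_cases hbb : isClBr b b2 = true
                      · rw [if_pos hbb]; simp [nextAtom, hbb]
                      · rw [if_neg hbb, nextAtom_tok1]; simp [hbb]
                  simp only [fbB, Bool.false_eq_true, if_neg (by simp : ¬ False), hnext]
                  cases hc3 : cs[i+2]? with
                  | none => cases prevAtom <;> simp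
                  | some b2 =>
                    cases prevAtom <;> cases hbb : isClBr b b2 <;> simp [hbb]
                · rw [if_neg hbond, if_neg hbr]
                  by_cases hatom : atomChars.contains c = true
                  · rw [if_pos hatom, if_pos (by simp), hIH1, hrhs, tok1_atom c _ hatom]
                    simp only [fbB, Bool.false_eq_true, if_neg (by simp : ¬ False)]
                    simp only [Bool.not_eq_true] at hbond
                    cases i with
                    | zero =>
                      rw [h0 rfl]
                      simp [pchar]
                    | succ j =>
                      have hq : j < cs.length := by omega
                      have hsome : cs[j]? = some (cs[j]'hq) :=
                        List.getElem?_eq_some_iff.mpr ⟨hq, rfl⟩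
                      have hpc : pchar cs (j+1) = some (cs[j]'hq) := by
                        simp [pchar, hsome]
                      rw [hpc]
                      cases prevAtom <;> cases hpb : bondChars.contains (cs[j]'hq) <;>
                        simp [hsome]
                  · rw [if_neg hatom, hIH1, hrhs,
                      tok1_other c _ hpar hrp (by simpa using hbond) (by simpa using hatom)]
                    simp [fbB]

-- ===== VERDICT (by name: the statement is the Claim_ definition above) =====
  theorem calculate_backbone_bonds_spec : Claim_equal_calculate_backbone_bonds := by
    intro smiles _
    unfold Spec_calculate_backbone_bonds calculate_backbone_bonds calculate_backbone_bonds_alt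
    have h := main_lemma (smiles.toList.filter (fun c => c ≠ '*'))
      (smiles.toList.filter (fun c => c ≠ '*')).length 0 0 false 0 false
      (by omega) (fun _ => rfl)
    simpa [pchar] using h
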